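-- pv_equiv track=rewrite | github.com/ltpitt/python-streamlit-flask-google-photo-copier | src/google_photos_sync/core/sync_service.py | _group_metadata_by_photo
-- ===== SOURCE A (Python) =====
-- from typing import Any, Callable, Optional
--
-- def _group_metadata_by_photo(
--     metadata_diffs: list[dict[str, Any]]
-- ) -> dict[str, list[dict[str, Any]]]:
--     """Group metadata differences by photo ID."""
--     metadata_by_photo: dict[str, list[dict[str, Any]]] = {}
--     for diff in metadata_diffs:
--         photo_id = diff["photo_id"]
--         if photo_id not in metadata_by_photo:
--             metadata_by_photo[photo_id] = []
--         metadata_by_photo[photo_id].append(diff)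
--     return metadata_by_photo
-- ===== SOURCE B (Python) =====
-- def _group_metadata_by_photo(metadata_diffs):
--     """Group metadata differences by photo ID (two-phase: unique keys, then one filter per key)."""
--     keys = list(dict.fromkeys(d["photo_id"] for d in metadata_diffs))
--     return {pid: [d for d in metadata_diffs if d["photo_id"] == pid] for pid in keys}
-- ===== Notes on version B (the rewrite author's own statement) =====
-- stated objective: alternative
-- what changed: Replaces the single accumulating dict-building pass with a two-phase comprehension: first collect the distinct photo_ids in first-appearance order (dict.fromkeys), then build each group by filtering the list once per key.
import Mathlib
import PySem

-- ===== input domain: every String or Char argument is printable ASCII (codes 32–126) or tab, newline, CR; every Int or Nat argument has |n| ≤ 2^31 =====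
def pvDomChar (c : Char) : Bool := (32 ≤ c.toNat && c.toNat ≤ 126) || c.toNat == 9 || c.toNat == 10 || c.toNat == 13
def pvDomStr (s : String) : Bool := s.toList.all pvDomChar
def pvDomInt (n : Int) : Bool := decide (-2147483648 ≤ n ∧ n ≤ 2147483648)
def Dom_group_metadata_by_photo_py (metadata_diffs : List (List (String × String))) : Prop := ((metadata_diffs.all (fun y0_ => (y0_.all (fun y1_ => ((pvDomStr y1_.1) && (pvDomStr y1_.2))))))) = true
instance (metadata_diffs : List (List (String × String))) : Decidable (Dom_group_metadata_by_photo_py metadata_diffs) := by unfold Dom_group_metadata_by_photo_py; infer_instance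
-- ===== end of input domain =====

-- B groups the diffs by photo_id in two phases (distinct keys in first-appearance order, then one
-- filter of the input per key) instead of A's single accumulating dict pass; same result, alternative shape.

-- diff["photo_id"]: first-match lookup in the association list (total stand-in; Pre_ guarantees the
-- key is present, i.e. Python's KeyError inputs are excluded)
def pvPid (diff : List (String × String)) : String :=
  (List.lookup "photo_id" diff).getD ""

-- ===== PORT A =====
def group_metadata_by_photo_py (metadata_diffs : List (List (String × String))) : List (String × List (List (String × String))) :=
  (metadata_diffs.foldl
    (fun (m : PySem.Dict String (List (List (String × String)))) diff =>
      let photo_id := pvPid diff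
      let m := if m.contains photo_id then m else m.insert photo_id []
      m.modify photo_id [] (· ++ [diff]))
    PySem.Dict.empty).items

-- ===== PORT B =====
def group_metadata_by_photo_py_alt (metadata_diffs : List (List (String × String))) : List (String × List (List (String × String))) :=
  let keys := PySem.List.dedup (metadata_diffs.map pvPid)
  keys.map (fun pid => (pid, metadata_diffs.filter (fun d => pvPid d == pid)))

-- ===== PRECONDITION & SPEC =====
-- Pre_ excludes exactly the inputs where some diff lacks the "photo_id" key: there Python A (and B) raise KeyError.
def Pre_group_metadata_by_photo_py (metadata_diffs : List (List (String × String))) : Prop :=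
  ∀ d ∈ metadata_diffs, "photo_id" ∈ d.map Prod.fst
instance (metadata_diffs : List (List (String × String))) : Decidable (Pre_group_metadata_by_photo_py metadata_diffs) := by unfold Pre_group_metadata_by_photo_py; infer_instance

def pvWitness_group_metadata_by_photo_py : (List (List (String × String))) :=
  [[("photo_id", "a"), ("title", "x")], [("photo_id", "b")], [("photo_id", "a"), ("title", "y")]]

def Spec_group_metadata_by_photo_py (metadata_diffs : List (List (String × String))) (out : List (String × List (List (String × String)))) : Prop := out = group_metadata_by_photo_py_alt metadata_diffs
instance (metadata_diffs : List (List (String × String))) (out : List (String × List (List (String × String)))) : Decidable (Spec_group_metadata_by_photo_py metadata_diffs out) := by unfold Spec_group_metadata_by_photo_py; infer_instance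

-- ===== CLAIM (what is proved, stated in full; the proofs are below) =====
def Claim_equal_group_metadata_by_photo_py : Prop := ∀ (metadata_diffs : List (List (String × String))), Dom_group_metadata_by_photo_py metadata_diffs → Pre_group_metadata_by_photo_py metadata_diffs → Spec_group_metadata_by_photo_py metadata_diffs (group_metadata_by_photo_py metadata_diffs)

-- ===== LEMMAS AND PROOFS =====

-- A's loop body (the 'if not in: set []' then append) is one dict 'modify' step.
theorem pv_step_eq (m : PySem.Dict String (List (List (String × String)))) (diff : List (String × String)) :
    (let photo_id := pvPid diff
     let m := if m.contains photo_id then m else m.insert photo_id []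
     m.modify photo_id [] (· ++ [diff]))
    = m.modify (pvPid diff) [] (· ++ [diff]) := by
  by_cases h : m.contains (pvPid diff) = true
  · simp [h]
  · simp only [Bool.not_eq_true] at h
    have hany : (m.items.any fun p => p.1 == pvPid diff) = false := by
      simpa [PySem.Dict.contains] using h
    have hfind : List.find? (fun p => p.1 == pvPid diff) m.items = none := by
      rw [List.find?_eq_none]
      intro p hp
      have := (List.any_eq_false.mp hany) p hp
      simpa using this
    have hmapid : ∀ v : String × List (List (String × String)),
        List.map (fun p => if p.1 = pvPid diff then v else p) m.items = m.items := by
      intro v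
      rw [List.map_congr_left, List.map_id]
      intro p hp
      have := (List.any_eq_false.mp hany) p hp
      simp at this
      simp [this]
    simp [PySem.Dict.modify, PySem.Dict.insert, PySem.Dict.getD, PySem.Dict.get?,
      PySem.Dict.contains, hany, hfind, List.find?_append, hmapid]

theorem group_metadata_by_photo_py_spec : Claim_equal_group_metadata_by_photo_py := by
  intro mds _ _
  unfold Spec_group_metadata_by_photo_py group_metadata_by_photo_py group_metadata_by_photo_py_alt
  have hfold : mds.foldl
      (fun (m : PySem.Dict String (List (List (String × String)))) diff =>
        let photo_id := pvPid diff
        let m := if m.contains photo_id then m else m.insert photo_id []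
        m.modify photo_id [] (· ++ [diff]))
      PySem.Dict.empty
      = mds.foldl (fun m diff => m.modify (pvPid diff) [] (· ++ [diff])) PySem.Dict.empty :=
    PySem.List.foldl_congr_mem mds _ _ _ (fun m diff _ => pv_step_eq m diff)
  rw [hfold]
  have hnd : (mds.foldl (fun m diff => m.modify (pvPid diff) [] (· ++ [diff])) PySem.Dict.empty).keys.Nodup :=
    PySem.Dict.nodup_keys_foldl_modify_key mds pvPid [] (fun _ diff v => v ++ [diff]) PySem.Dict.empty
      (by simp)
  rw [PySem.Dict.items_eq_map_keys _ hnd []]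
  rw [PySem.Dict.keys_foldl_modify_key mds pvPid [] (fun _ diff v => v ++ [diff]) PySem.Dict.empty]
  rw [show PySem.Dict.empty.keys = ([] : List String) from rfl, PySem.Set.update_nil_left]
  simp only [PySem.List.dedup_eq_ofList]
  apply List.map_congr_left
  intro k _
  have hgetD : (mds.foldl (fun m diff => m.modify (pvPid diff) [] (· ++ [diff])) PySem.Dict.empty).getD k []
      = (mds.filter (fun d => pvPid d == k)).map id := by
    have hmapped : List.foldl (fun (m : PySem.Dict String (List (List (String × String)))) diff =>
          m.modify (pvPid diff) [] (· ++ [diff])) PySem.Dict.empty mds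
        = List.foldl (fun m (p : String × List (String × String)) => m.modify p.1 [] (· ++ [p.2]))
          PySem.Dict.empty (mds.map (fun d => (pvPid d, d))) := by
      rw [List.foldl_map]
    rw [hmapped, PySem.Dict.getD_foldl_modify_append]
    simp [List.filter_map, Function.comp_def]
  rw [hgetD]
  simp
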